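-- pv_equiv track=rewrite | github.com/DongqiZuo00/Neural-TAMP | src/planning/semantic_mapper.py | _expand_generic_labels
-- ===== SOURCE A (Python) =====
-- _GENERIC_SYNONYMS = {
--     "shelf": {"tvstand", "bookshelf", "shelf", "cabinet"},
--     "stand": {"tvstand", "nightstand", "stand"},
--     "table": {"table", "diningtable", "coffeetable", "sidetable"},
--     "counter": {"countertop", "counter"},
--     "container": {"cabinet", "drawer", "fridge", "microwave", "box"},
-- }
--
-- def _expand_generic_labels(label: str) -> list[str]:
--     expanded = set()
--     for key, synonyms in _GENERIC_SYNONYMS.items():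
--         if label == key or label in synonyms:
--             expanded.update(synonyms)
--     if not expanded:
--         expanded.add(label)
--     return sorted(expanded)
-- ===== SOURCE B (Python) =====
-- _GROUPS = [
--     ("shelf", ["tvstand", "bookshelf", "shelf", "cabinet"]),
--     ("stand", ["tvstand", "nightstand", "stand"]),
--     ("table", ["table", "diningtable", "coffeetable", "sidetable"]),
--     ("counter", ["countertop", "counter"]),
--     ("container", ["cabinet", "drawer", "fridge", "microwave", "box"]),
-- ]
--
-- # reverse index built once: every member (and the key itself) maps to the
-- # union of all groups it belongs to
-- _REVERSE = {}
-- for _key, _syns in _GROUPS: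
--     for _m in _syns + [_key]:
--         _REVERSE.setdefault(_m, set()).update(_syns)
--
--
-- def _expand_generic_labels(label: str) -> list[str]:
--     return sorted(_REVERSE.get(label, {label}))
-- ===== Notes on version B (the rewrite author's own statement) =====
-- stated objective: idiomatic
-- what changed: A scans every synonym group on each call; B precomputes a module-level reverse index (label -> union of all its groups, keys included) once, so the call is a single dict lookup followed by sorted().
import Mathlib
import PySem

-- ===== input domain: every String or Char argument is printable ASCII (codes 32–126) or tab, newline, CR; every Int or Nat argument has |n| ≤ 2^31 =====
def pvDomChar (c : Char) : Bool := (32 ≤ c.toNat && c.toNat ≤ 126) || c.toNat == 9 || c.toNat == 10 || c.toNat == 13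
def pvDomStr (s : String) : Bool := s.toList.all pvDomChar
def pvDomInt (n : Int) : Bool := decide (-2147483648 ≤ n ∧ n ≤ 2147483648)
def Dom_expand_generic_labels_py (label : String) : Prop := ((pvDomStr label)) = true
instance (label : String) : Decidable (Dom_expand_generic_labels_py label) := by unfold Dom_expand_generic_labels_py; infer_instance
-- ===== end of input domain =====

-- B replaces A's per-call scan over every synonym group by a one-time reverse index
-- (label → union of its groups), so the call is a single dict lookup (idiomatic).

-- ===== PORT A =====
-- _GENERIC_SYNONYMS, in the dict's insertion order; each value a Python set
def pvSynonyms : List (String × PySem.Set String) := [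
  ("shelf", PySem.Set.ofList ["tvstand", "bookshelf", "shelf", "cabinet"]),
  ("stand", PySem.Set.ofList ["tvstand", "nightstand", "stand"]),
  ("table", PySem.Set.ofList ["table", "diningtable", "coffeetable", "sidetable"]),
  ("counter", PySem.Set.ofList ["countertop", "counter"]),
  ("container", PySem.Set.ofList ["cabinet", "drawer", "fridge", "microwave", "box"])]

def expand_generic_labels_py (label : String) : List String :=
  let expanded : PySem.Set String :=
    pvSynonyms.foldl (fun expanded kv =>
      if label == kv.1 || PySem.Set.contains kv.2 label
      then PySem.Set.update expanded kv.2 else expanded) PySem.Set.empty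
  let expanded := if expanded.isEmpty then PySem.Set.add expanded label else expanded
  PySem.List.sorted expanded (fun x => x) false

-- ===== PORT B =====
-- B's _GROUPS list (keys with synonym lists)
def pvGroups : List (String × List String) := [
  ("shelf", ["tvstand", "bookshelf", "shelf", "cabinet"]),
  ("stand", ["tvstand", "nightstand", "stand"]),
  ("table", ["table", "diningtable", "coffeetable", "sidetable"]),
  ("counter", ["countertop", "counter"]),
  ("container", ["cabinet", "drawer", "fridge", "microwave", "box"])]

-- B's module-level reverse index: _REVERSE.setdefault(m, set()).update(syns)
-- is d[m] = d.get(m, set()) ∪ syns, i.e. Dict.modify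
def pvReverse : PySem.Dict String (PySem.Set String) :=
  pvGroups.foldl (fun d kv =>
    (kv.2 ++ [kv.1]).foldl (fun d m =>
      d.modify m PySem.Set.empty (fun s => PySem.Set.update s kv.2)) d)
    PySem.Dict.empty

def expand_generic_labels_py_alt (label : String) : List String :=
  PySem.List.sorted (pvReverse.getD label (PySem.Set.ofList [label])) (fun x => x) false

-- ===== PRECONDITION & SPEC =====
def Spec_expand_generic_labels_py (label : String) (out : List String) : Prop := out = expand_generic_labels_py_alt label
instance (label : String) (out : List String) : Decidable (Spec_expand_generic_labels_py label out) := by unfold Spec_expand_generic_labels_py; infer_instance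

-- ===== CLAIM (what is proved, stated in full; the proofs are below) =====
def Claim_equal_expand_generic_labels_py : Prop := ∀ (label : String), Dom_expand_generic_labels_py label → Spec_expand_generic_labels_py label (expand_generic_labels_py label)

-- ===== LEMMAS AND PROOFS =====

-- every label occurring anywhere in the table (keys and members)
def pvKnown : List String :=
  ["tvstand", "bookshelf", "shelf", "cabinet", "nightstand", "stand", "table",
   "diningtable", "coffeetable", "sidetable", "countertop", "counter", "drawer",
   "fridge", "microwave", "box", "container"]

-- the reverse index, fully evaluated
lemma pvReverse_eq : pvReverse = PySem.Dict.mk [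
  ("tvstand", ["tvstand", "bookshelf", "shelf", "cabinet", "nightstand", "stand"]),
  ("bookshelf", ["tvstand", "bookshelf", "shelf", "cabinet"]),
  ("shelf", ["tvstand", "bookshelf", "shelf", "cabinet"]),
  ("cabinet", ["tvstand", "bookshelf", "shelf", "cabinet", "drawer", "fridge", "microwave", "box"]),
  ("nightstand", ["tvstand", "nightstand", "stand"]),
  ("stand", ["tvstand", "nightstand", "stand"]),
  ("table", ["table", "diningtable", "coffeetable", "sidetable"]),
  ("diningtable", ["table", "diningtable", "coffeetable", "sidetable"]),
  ("coffeetable", ["table", "diningtable", "coffeetable", "sidetable"]),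
  ("sidetable", ["table", "diningtable", "coffeetable", "sidetable"]),
  ("countertop", ["countertop", "counter"]),
  ("counter", ["countertop", "counter"]),
  ("drawer", ["cabinet", "drawer", "fridge", "microwave", "box"]),
  ("fridge", ["cabinet", "drawer", "fridge", "microwave", "box"]),
  ("microwave", ["cabinet", "drawer", "fridge", "microwave", "box"]),
  ("box", ["cabinet", "drawer", "fridge", "microwave", "box"]),
  ("container", ["cabinet", "drawer", "fridge", "microwave", "box"])] := by decide

lemma eqsort (X Y : List String) (h : X.Perm Y) :
    PySem.List.sorted X (fun x => x) false = PySem.List.sorted Y (fun x => x) false :=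
  PySem.List.sorted_eq_sorted_of_perm X Y (fun x => x) (fun _ _ hxy => hxy) h

lemma unknown_eq (label : String) (h : label ∉ pvKnown) :
    expand_generic_labels_py label = expand_generic_labels_py_alt label := by
  simp only [pvKnown, List.mem_cons, List.not_mem_nil, or_false, not_or] at h
  obtain ⟨h1, h2, h3, h4, h5, h6, h7, h8, h9, h10, h11, h12, h13, h14, h15, h16, h17⟩ := h
  have hs : PySem.List.sorted [label] (fun x => x) false = [label] :=
    PySem.List.sorted_eq_self_of_pairwise [label] (fun x => x) (List.pairwise_singleton _ _)
  unfold expand_generic_labels_py expand_generic_labels_py_alt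
  rw [pvReverse_eq]
  simp [pvSynonyms, List.foldl, PySem.Set.contains, PySem.Set.ofList, PySem.Set.add,
        PySem.Set.empty, PySem.Dict.getD, PySem.Dict.get?, Option.getD,
        h1, h2, h3, h4, h5, h6, h7, h8, h9, h10, h11, h12, h13, h14, h15, h16, h17, Ne.symm h1, Ne.symm h2, Ne.symm h3, Ne.symm h4, Ne.symm h5, Ne.symm h6, Ne.symm h7, Ne.symm h8, Ne.symm h9, Ne.symm h10, Ne.symm h11, Ne.symm h12, Ne.symm h13, Ne.symm h14, Ne.symm h15, Ne.symm h16, Ne.symm h17, hs]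

-- ===== VERDICT (by name: the statement is the Claim_ definition above) =====
theorem expand_generic_labels_py_spec : Claim_equal_expand_generic_labels_py := by
  intro label _
  unfold Spec_expand_generic_labels_py
  by_cases h : label ∈ pvKnown
  · simp only [pvKnown, List.mem_cons, List.not_mem_nil, or_false] at h
    rcases h with rfl | rfl | rfl | rfl | rfl | rfl | rfl | rfl | rfl | rfl | rfl | rfl | rfl | rfl | rfl | rfl | rfl <;> exact eqsort _ _ (by decide)
  · exact unknown_eq label h
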